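-- pv_equiv track=rewrite | github.com/Akuukis/beancount_interpolate | beancount_interpolate/common.py | longest_leg
-- ===== SOURCE A (Python) =====
-- def longest_leg(all_amounts):
--     """
--     Find the longest leg between amounts.
--
--     Args:
--         all_amounts: list of amounts.
--     Returns:
--         index of logest leg.
--     """
--     firsts = []
--     for amounts in all_amounts:
--         if len(amounts) == 0:
--             # Should not have empty postings, but if do then at least don't crash.
--             firsts.append( 0 )
--         else:
--             firsts.append( abs(amounts[0]) )
--
--     return firsts.index(max(firsts))
-- ===== SOURCE B (Python) =====
-- def longest_leg(all_amounts):
--     """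
--     Find the longest leg between amounts.
--
--     Single-pass argmax: track the best index and best value while scanning,
--     instead of materialising the list of first-amount magnitudes and then
--     calling max()/index() on it.  Strict '>' keeps first-tie semantics.
--     """
--     best_i = -1
--     best_v = -1
--     for i, amounts in enumerate(all_amounts):
--         v = abs(amounts[0]) if amounts else 0
--         if v > best_v:
--             best_i, best_v = i, v
--     if best_i < 0:
--         raise ValueError("longest_leg() arg is an empty sequence")
--     return best_i
-- ===== Notes on version B (the rewrite author's own statement) =====
-- stated objective: idiomatic
-- what changed: Fuses A's three passes (build firsts list, max(), .index()) into one single-pass argmax loop with a running best index/value and strict '>' so the first maximum wins.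
import Mathlib
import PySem

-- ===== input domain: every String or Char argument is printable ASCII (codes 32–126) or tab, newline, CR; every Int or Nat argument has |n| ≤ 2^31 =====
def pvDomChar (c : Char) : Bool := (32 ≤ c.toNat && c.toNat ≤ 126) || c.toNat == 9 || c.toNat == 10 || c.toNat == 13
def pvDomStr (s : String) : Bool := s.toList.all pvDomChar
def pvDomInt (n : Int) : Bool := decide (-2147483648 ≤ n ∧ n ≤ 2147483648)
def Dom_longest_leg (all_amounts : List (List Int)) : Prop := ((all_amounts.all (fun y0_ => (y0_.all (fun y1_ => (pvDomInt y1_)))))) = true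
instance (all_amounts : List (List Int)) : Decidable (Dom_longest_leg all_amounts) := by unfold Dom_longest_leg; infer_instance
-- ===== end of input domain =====

-- B fuses A's three passes (build the firsts list, max(), .index()) into one
-- single-pass argmax loop; return values agree on every non-empty input.

-- ===== PORT A =====
-- A: build firsts (0 for an empty inner list, else abs of its first element),
-- then return firsts.index(max(firsts)).  On [] Python's max raises ValueError
-- (excluded by Pre_); the port returns 0 there.
def longest_leg (all_amounts : List (List Int)) : Int :=
  let firsts : List Int := all_amounts.foldl
    (fun acc amounts =>
      match amounts with
      | [] => acc ++ [0]
      | x :: _ => acc ++ [|x|]) []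
  match PySem.List.max? firsts (fun y => y) with
  | none => 0
  | some m => ((PySem.List.index? firsts m).getD 0 : Nat)

-- ===== PORT B =====
-- B: single pass over enumerate(all_amounts) keeping (best_i, best_v),
-- strict '>' update.  best_i < 0 ⇔ empty input, where Python B raises
-- ValueError (excluded by Pre_); the port returns 0 there.
def longest_leg_alt (all_amounts : List (List Int)) : Int :=
  let r := (PySem.List.enumerate all_amounts 0).foldl
    (fun (b : Int × Int) p =>
      let v : Int := match p.2 with | [] => 0 | x :: _ => |x|
      if v > b.2 then (p.1, v) else b) (-1, -1)
  if r.1 < 0 then 0 else r.1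

-- ===== PRECONDITION & SPEC =====
-- Pre_ excludes only the empty outer list, on which both Pythons raise ValueError.
def Pre_longest_leg (all_amounts : List (List Int)) : Prop := all_amounts ≠ []
instance (all_amounts : List (List Int)) : Decidable (Pre_longest_leg all_amounts) := by unfold Pre_longest_leg; infer_instance
def pvWitness_longest_leg : List (List Int) := [[3, 1], [], [-7]]

def Spec_longest_leg (all_amounts : List (List Int)) (out : Int) : Prop := out = longest_leg_alt all_amounts
instance (all_amounts : List (List Int)) (out : Int) : Decidable (Spec_longest_leg all_amounts out) := by unfold Spec_longest_leg; infer_instance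

-- ===== CLAIM (what is proved, stated in full; the proofs are below) =====
def Claim_equal_longest_leg : Prop := ∀ (all_amounts : List (List Int)), Dom_longest_leg all_amounts → Pre_longest_leg all_amounts → Spec_longest_leg all_amounts (longest_leg all_amounts)

-- ===== LEMMAS AND PROOFS =====

-- value extracted from one inner list
def pvFirst (amounts : List Int) : Int :=
  match amounts with | [] => 0 | x :: _ => |x|

theorem pvFirst_nonneg (a : List Int) : 0 ≤ pvFirst a := by
  cases a <;> simp [pvFirst, abs_nonneg]

theorem firsts_eq_map (all_amounts : List (List Int)) (acc : List Int) :
    all_amounts.foldl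
      (fun acc amounts =>
        match amounts with
        | [] => acc ++ [0]
        | x :: _ => acc ++ [|x|]) acc = acc ++ all_amounts.map pvFirst := by
  induction all_amounts generalizing acc with
  | nil => simp
  | cons a t ih => cases a <;> simp [List.foldl_cons, ih, pvFirst]

theorem foldl_max_comm (r : List Int) (a y : Int) :
    r.foldl max (max y a) = max y (r.foldl max a) := by
  induction r generalizing a with
  | nil => simp
  | cons b r' ih => simp [List.foldl_cons, max_assoc, ih]

theorem foldl_max_eq_max? (t : List Int) (y : Int) :
    t.foldl max y = match PySem.List.max? t (fun x => x) with
      | none => y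
      | some mt => max y mt := by
  cases t with
  | nil => simp [PySem.List.max?]
  | cons a r =>
    rw [PySem.List.max?_id_cons]
    simpa using foldl_max_comm r a y

-- the core invariant: the fold over enumerate ys s computes the argmax
theorem argmax_fold (ys : List Int) (bi bv : Int) (s : Int) :
    (PySem.List.enumerate ys s).foldl
      (fun (b : Int × Int) p => if p.2 > b.2 then (p.1, p.2) else b) (bi, bv) =
    match PySem.List.max? ys (fun x => x) with
    | none => (bi, bv)
    | some m => if m > bv
        then (s + ((PySem.List.index? ys m).getD 0 : Nat), m)
        else (bi, bv) := by
  induction ys generalizing bi bv s with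
  | nil => simp [PySem.List.enumerate_nil, PySem.List.max?]
  | cons y t ih =>
    rw [PySem.List.enumerate_cons, List.foldl_cons, PySem.List.max?_id_cons]
    simp only [gt_iff_lt]
    have hm := foldl_max_eq_max? t y
    have hself : PySem.List.index? (y :: t) y = some 0 := PySem.List.index?_cons_self y t
    by_cases hy : bv < y
    · rw [if_pos hy, ih]
      simp only [gt_iff_lt]
      rcases ht : PySem.List.max? t (fun x => x) with _ | mt
      · rw [ht] at hm; dsimp only at hm
        dsimp only
        rw [hm, if_pos hy, hself]
        simp
      · rw [ht] at hm; dsimp only at hm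
        dsimp only
        rw [hm]
        by_cases hmt : y < mt
        · have hym : max y mt = mt := max_eq_right (le_of_lt hmt)
          rw [hym, if_pos hmt, if_pos (lt_trans hy hmt)]
          have hidx : PySem.List.index? (y :: t) mt
              = (PySem.List.index? t mt).map (· + 1) :=
            PySem.List.index?_cons_of_ne t (ne_of_lt hmt)
          have hmem : mt ∈ t := PySem.List.max?_mem ht
          rcases Option.isSome_iff_exists.mp
            ((PySem.List.index?_isSome_iff (xs := t) (v := mt)).mpr hmem) with ⟨k, hk⟩
          rw [hidx, hk]
          simp only [Option.map_some, Option.getD_some]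
          refine Prod.ext ?_ rfl
          push_cast
          ring
        · have hym : max y mt = y := max_eq_left (le_of_not_gt hmt)
          rw [hym, if_neg hmt, if_pos hy, hself]
          simp
    · rw [if_neg hy, ih]
      simp only [gt_iff_lt]
      rcases ht : PySem.List.max? t (fun x => x) with _ | mt
      · rw [ht] at hm; dsimp only at hm
        dsimp only
        rw [hm, if_neg hy]
      · rw [ht] at hm; dsimp only at hm
        dsimp only
        rw [hm]
        by_cases hmt : bv < mt
        · have hmty : y < mt := lt_of_le_of_lt (le_of_not_gt hy) hmt
          have hym : max y mt = mt := max_eq_right (le_of_lt hmty)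
          rw [hym, if_pos hmt, if_pos hmt]
          have hidx : PySem.List.index? (y :: t) mt
              = (PySem.List.index? t mt).map (· + 1) :=
            PySem.List.index?_cons_of_ne t (ne_of_lt hmty)
          have hmem : mt ∈ t := PySem.List.max?_mem ht
          rcases Option.isSome_iff_exists.mp
            ((PySem.List.index?_isSome_iff (xs := t) (v := mt)).mpr hmem) with ⟨k, hk⟩
          rw [hidx, hk]
          simp only [Option.map_some, Option.getD_some]
          refine Prod.ext ?_ rfl
          push_cast
          ring
        · have hmb : ¬ bv < max y mt := by
            rcases max_cases y mt with ⟨he, _⟩ | ⟨he, _⟩ <;> rw [he] <;> [exact hy; exact hmt]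
          rw [if_neg hmt, if_neg hmb]

theorem enumerate_map_fold (all_amounts : List (List Int)) (b : Int × Int) (s : Int) :
    (PySem.List.enumerate all_amounts s).foldl
      (fun (b : Int × Int) p =>
        let v : Int := match p.2 with | [] => 0 | x :: _ => |x|
        if v > b.2 then (p.1, v) else b) b =
    (PySem.List.enumerate (all_amounts.map pvFirst) s).foldl
      (fun (b : Int × Int) p => if p.2 > b.2 then (p.1, p.2) else b) b := by
  induction all_amounts generalizing b s with
  | nil => simp [PySem.List.enumerate_nil]
  | cons a t ih =>
    simp only [List.map_cons, PySem.List.enumerate_cons, List.foldl_cons]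
    rw [ih]
    cases a <;> rfl

-- ===== VERDICT (by name: the statement is the Claim_ definition above) =====
theorem longest_leg_spec : Claim_equal_longest_leg := by
  intro all_amounts _ hpre
  unfold Spec_longest_leg longest_leg longest_leg_alt
  rw [firsts_eq_map, enumerate_map_fold, argmax_fold]
  simp only [List.nil_append]
  rcases hmax : PySem.List.max? (all_amounts.map pvFirst) (fun x => x) with _ | m
  · exact absurd (by simpa using (PySem.List.max?_eq_none_iff _ _).mp hmax) hpre
  · dsimp only
    have hmem : m ∈ all_amounts.map pvFirst := PySem.List.max?_mem hmax
    have hm0 : 0 ≤ m := by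
      rcases List.mem_map.mp hmem with ⟨a, _, ha⟩
      rw [← ha]; exact pvFirst_nonneg a
    have hgt : (-1 : Int) < m := by omega
    simp only [gt_iff_lt, hgt, if_true, zero_add]
    rw [if_neg (not_lt.mpr (Int.natCast_nonneg _))]
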